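-- pv_equiv track=rewrite | github.com/hirohaya/ping-champions | backend/utils/bracket_generator.py | _seed_players
-- ===== SOURCE A (Python) =====
-- from typing import List, Dict, Any
--
-- def _seed_players(
--
--     participants_ids: List[int],
--     total_slots: int
-- ) -> List[int]:
--     """
--     Seed players for single elimination bracket
--
--     Uses "balanced seeding" to spread top players throughout bracket.
--     """
--     n_players = len(participants_ids)
--     seeded = [None] * total_slots
--
--     # Simple seeding: alternate high and low seed positions
--     low = 0
--     high = total_slots - 1
--
--     for idx, player_id in enumerate(participants_ids):
--         if idx % 2 == 0:
--             seeded[low] = player_id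
--             low += 1
--         else:
--             seeded[high] = player_id
--             high -= 1
--
--     return seeded
-- ===== SOURCE B (Python) =====
-- from typing import List
--
--
-- def _seed_players(
--     participants_ids: List[int],
--     total_slots: int
-- ) -> List[int]:
--     """Seed players: even-indexed seeds fill the bracket from the front,
--     odd-indexed seeds fill it from the back (in reverse order)."""
--     seeded = [None] * total_slots
--     front = participants_ids[0::2]
--     back = participants_ids[1::2]
--     seeded[:len(front)] = front
--     seeded[total_slots - len(back):] = back[::-1]
--     return seeded
-- ===== Notes on version B (the rewrite author's own statement) =====
-- stated objective: simpler
-- what changed: Replaces the alternating loop with moving low/high cursors by partitioning the seeds into the two stride-2 subsequences and placing them with two bulk slice assignments (front subsequence at the head, reversed back subsequence at the tail).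
-- outside the precondition, e.g. on _seed_players([1, 2, 3], 2): A returns [1, 3], B returns [1, 2]; on _seed_players([7], 0): A raises IndexError, B returns []
import Mathlib
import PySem

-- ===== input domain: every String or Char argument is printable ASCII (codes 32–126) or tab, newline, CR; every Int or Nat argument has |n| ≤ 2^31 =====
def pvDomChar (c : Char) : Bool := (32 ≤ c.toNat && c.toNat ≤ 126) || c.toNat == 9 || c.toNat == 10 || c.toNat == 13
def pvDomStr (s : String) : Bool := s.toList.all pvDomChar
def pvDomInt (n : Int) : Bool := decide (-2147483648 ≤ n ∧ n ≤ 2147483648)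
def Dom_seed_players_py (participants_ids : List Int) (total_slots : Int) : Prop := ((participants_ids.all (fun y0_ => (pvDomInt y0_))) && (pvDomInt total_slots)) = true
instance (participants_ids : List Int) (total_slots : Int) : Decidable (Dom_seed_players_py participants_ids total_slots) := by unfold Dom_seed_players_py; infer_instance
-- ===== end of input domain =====

-- B replaces A's alternating low/high-cursor loop by slicing the seeds into the two
-- stride-2 subsequences and placing them with two bulk slice assignments (objective: simpler).

-- ===== PORT A =====
-- the for-loop of A: state (seeded, low, high), idx counts from 0; seeded[...] = x is pySet? (none = IndexError)
def seedLoopA : List Int → Nat → List (Option Int) → Int → Int → Option (List (Option Int))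
  | [], _, seeded, _, _ => some seeded
  | p :: rest, idx, seeded, low, high =>
    if idx % 2 == 0 then
      match PySem.List.pySet? seeded low (some p) with
      | none => none
      | some s => seedLoopA rest (idx + 1) s (low + 1) high
    else
      match PySem.List.pySet? seeded high (some p) with
      | none => none
      | some s => seedLoopA rest (idx + 1) s low (high - 1)

def seed_players_py (participants_ids : List Int) (total_slots : Int) : List (Option Int) :=
  (seedLoopA participants_ids 0 (List.replicate total_slots.toNat none) 0 (total_slots - 1)).getD []

-- ===== PORT B =====
def seed_players_py_alt (participants_ids : List Int) (total_slots : Int) : List (Option Int) :=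
  let seeded : List (Option Int) := List.replicate total_slots.toNat none
  let front : List Int := (PySem.List.slice? participants_ids (some 0) none 2).getD []   -- participants_ids[0::2]
  let back  : List Int := (PySem.List.slice? participants_ids (some 1) none 2).getD []   -- participants_ids[1::2]
  -- seeded[:len(front)] = front  (slice assignment: front, then the rest of seeded)
  let seeded1 : List (Option Int) := front.map some ++ seeded.drop front.length
  -- seeded[total_slots - len(back):] = back[::-1]
  PySem.List.slice seeded1 none (some (total_slots - back.length)) ++
    (((PySem.List.slice? back none none (-1)).getD []).map some)

-- ===== PRECONDITION & SPEC =====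
-- Pre_ excludes inputs with more (nonzero) players than slots: there A's colliding low/high
-- cursors silently overwrite earlier seeds (or raise IndexError), an accident of the
-- two-moving-pointers implementation that no caller of a bracket seeder relies on.
def Pre_seed_players_py (participants_ids : List Int) (total_slots : Int) : Prop :=
  participants_ids = [] ∨ (participants_ids.length : Int) ≤ total_slots
instance (participants_ids : List Int) (total_slots : Int) : Decidable (Pre_seed_players_py participants_ids total_slots) := by unfold Pre_seed_players_py; infer_instance

def pvWitness_seed_players_py : List Int × Int := ([5, 1, 4, 2, 3], 8)

def Spec_seed_players_py (participants_ids : List Int) (total_slots : Int) (out : List (Option Int)) : Prop := out = seed_players_py_alt participants_ids total_slots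
instance (participants_ids : List Int) (total_slots : Int) (out : List (Option Int)) : Decidable (Spec_seed_players_py participants_ids total_slots out) := by unfold Spec_seed_players_py; infer_instance

-- ===== CLAIM (what is proved, stated in full; the proofs are below) =====
def Claim_equal_seed_players_py : Prop := ∀ (participants_ids : List Int) (total_slots : Int), Dom_seed_players_py participants_ids total_slots → Pre_seed_players_py participants_ids total_slots → Spec_seed_players_py participants_ids total_slots (seed_players_py participants_ids total_slots)

-- ===== LEMMAS AND PROOFS =====

-- the even- and odd-position subsequences of a list (xs[0::2] and xs[1::2])
mutual
def pvEvens : List Int → List Int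
  | [] => []
  | a :: l => a :: pvOdds l
def pvOdds : List Int → List Int
  | [] => []
  | _ :: l => pvEvens l
end

lemma pvEvens_odds_length (l : List Int) :
    (pvEvens l).length + (pvOdds l).length = l.length := by
  induction l with
  | nil => simp [pvEvens, pvOdds]
  | cons a t ih => simp [pvEvens, pvOdds] at *; omega

lemma set_len_append {α : Type} (P : List α) (x v : α) (T : List α) :
    (P ++ x :: T).set P.length v = P ++ v :: T := by
  induction P with
  | nil => simp
  | cons a P ih => simp [ih]

-- characterization of A's loop: writes the evens after P, the odds (reversed) before S
lemma seedLoopA_char (l : List Int) :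
    ∀ (idx : Nat) (P S : List (Option Int)) (m : Nat), l.length ≤ m →
    seedLoopA l idx (P ++ List.replicate m none ++ S) (P.length : Int)
        ((P.length : Int) + (m : Int) - 1) =
      some (P ++ (if idx % 2 == 0 then
          (pvEvens l).map some ++ List.replicate (m - l.length) none ++ ((pvOdds l).map some).reverse
        else
          (pvOdds l).map some ++ List.replicate (m - l.length) none ++ ((pvEvens l).map some).reverse) ++ S) := by
  induction l with
  | nil => intro idx P S m h; simp [seedLoopA, pvEvens, pvOdds]
  | cons p rest ih =>
    intro idx P S m h
    have hm : 1 ≤ m := by simp at h; omega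
    by_cases hpar : idx % 2 = 0
    · -- write at low = P.length
      have hset : PySem.List.pySet? (P ++ List.replicate m none ++ S) (P.length : Int) (some p)
          = some (P ++ some p :: List.replicate (m - 1) none ++ S) := by
        rw [PySem.List.pySet?_natCast _ _ _ (by simp; omega)]
        have hrep : List.replicate m (none : Option Int) = none :: List.replicate (m - 1) none := by
          cases m with
          | zero => omega
          | succ k => simp [List.replicate]
        rw [hrep]
        have := set_len_append P (none : Option Int) (some p) (List.replicate (m - 1) none ++ S)
        simpa using this
      simp only [seedLoopA, hpar]
      simp only [beq_self_eq_true, if_true, hset]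
      have hP' : (P ++ [some p]).length = P.length + 1 := by simp
      have key := ih (idx + 1) (P ++ [some p]) S (m - 1) (by simp at h ⊢; omega)
      have harr : ((P ++ [some p]).length : Int) = (P.length : Int) + 1 := by simp
      rw [harr] at key
      have harr2 : ((P.length : Int) + 1 + ((m - 1 : Nat) : Int) - 1) = (P.length : Int) + (m : Int) - 1 := by
        push_cast [Nat.cast_sub hm]; ring
      rw [harr2] at key
      have hassoc : (P ++ [some p]) ++ List.replicate (m - 1) none ++ S
          = P ++ some p :: List.replicate (m - 1) none ++ S := by simp
      rw [hassoc] at key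
      rw [key]
      have hpar' : (idx + 1) % 2 = 1 := by omega
      simp only [hpar', pvEvens, pvOdds]
      simp
      omega
    · -- write at high = P.length + m - 1
      have hone : (1 : Nat) % 2 = 1 := by decide
      have hidx : idx % 2 = 1 := by omega
      have hlen : ((P.length + (m - 1) : Nat) : Int) = (P.length : Int) + (m : Int) - 1 := by
        push_cast [Nat.cast_sub hm]; ring
      have hrep : List.replicate m (none : Option Int) = List.replicate (m - 1) none ++ [none] := by
        have : m = (m - 1) + 1 := by omega
        rw [this]; simp [List.replicate_succ']
      have hset : PySem.List.pySet? (P ++ List.replicate m none ++ S)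
            ((P.length : Int) + (m : Int) - 1) (some p)
          = some (P ++ (List.replicate (m - 1) none ++ some p :: S)) := by
        rw [← hlen, PySem.List.pySet?_natCast _ _ _ (by simp; omega)]
        rw [hrep]
        have h1 : P ++ (List.replicate (m - 1) none ++ [none]) ++ S
            = (P ++ List.replicate (m - 1) none) ++ none :: S := by simp
        rw [h1]
        have h2 := set_len_append (P ++ List.replicate (m - 1) none) (none : Option Int) (some p) S
        have h3 : (P ++ List.replicate (m - 1) (none : Option Int)).length = P.length + (m - 1) := by simp
        rw [h3] at h2
        rw [h2]; simp
      simp only [seedLoopA, hidx]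
      simp only [hset]
      norm_num
      have key := ih (idx + 1) P (some p :: S) (m - 1) (by simp at h ⊢; omega)
      have harr2 : ((P.length : Int) + ((m - 1 : Nat) : Int) - 1) = (P.length : Int) + (m : Int) - 1 - 1 := by
        push_cast [Nat.cast_sub hm]; ring
      rw [harr2] at key
      have hassoc : P ++ List.replicate (m - 1) none ++ some p :: S
          = P ++ (List.replicate (m - 1) none ++ some p :: S) := by simp
      rw [hassoc] at key
      rw [key]
      have hpar' : (idx + 1) % 2 = 0 := by omega
      simp only [hpar', pvEvens, pvOdds]
      simp
      omega

-- participants_ids[0::2] and participants_ids[1::2] are pvEvens / pvOdds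
lemma slice2_aux (xs : List Int) :
    (List.filterMap (fun k => xs[2 * k]?) (List.range ((xs.length + 1) / 2)) = pvEvens xs) ∧
    (List.filterMap (fun k => xs[1 + 2 * k]?) (List.range (xs.length / 2)) = pvOdds xs) := by
  induction xs with
  | nil => simp [pvEvens, pvOdds]
  | cons a t ih =>
    constructor
    · have hc : (t.length + 1 + 1) / 2 = t.length / 2 + 1 := by omega
      simp only [List.length_cons, hc, List.range_succ_eq_map]
      rw [List.filterMap_cons]
      simp only [Nat.mul_zero, List.getElem?_cons_zero, List.filterMap_map]
      have hf : ((fun k => (a :: t)[2 * k]?) ∘ Nat.succ) = (fun k => t[1 + 2 * k]?) := by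
        funext k
        have : 2 * Nat.succ k = (1 + 2 * k) + 1 := by omega
        simp [this]
      rw [hf, ih.2]
      simp [pvEvens]
    · have hc : (t.length + 1) / 2 = (t.length + 1) / 2 := rfl
      simp only [List.length_cons]
      have hf : (fun k => (a :: t)[1 + 2 * k]?) = (fun k => t[2 * k]?) := by
        funext k
        have : 1 + 2 * k = (2 * k) + 1 := by omega
        simp [this]
      have hc2 : (t.length + 1) / 2 = (t.length + 1) / 2 := rfl
      rw [hf]
      simp only [pvOdds]
      exact ih.1
  
lemma slice?_step2_zero (xs : List Int) :
    PySem.List.slice? xs (some 0) none 2 = some (pvEvens xs) := by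
  simp only [PySem.List.slice?, PySem.List.sliceIndices]
  norm_num
  have hc : (if 0 < xs.length then (((xs.length : Int) + 2 - 1) / 2).toNat else 0)
      = (xs.length + 1) / 2 := by split_ifs with h <;> omega
  rw [hc]
  have hf : (fun x : Nat => xs[(2 * (x : Int)).toNat]?) = (fun k => xs[2 * k]?) := by
    funext k
    have h2 : (2 * (k : Int)).toNat = 2 * k := by omega
    rw [h2]
  rw [hf, (slice2_aux xs).1]

lemma slice?_step2_one (xs : List Int) :
    PySem.List.slice? xs (some 1) none 2 = some (pvOdds xs) := by
  cases xs with
  | nil => simp [PySem.List.slice?, PySem.List.sliceIndices, pvOdds]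
  | cons a t =>
    simp only [PySem.List.slice?, PySem.List.sliceIndices]
    norm_num
    have hc : (if 0 < t.length then (((t.length : Int) + 2 - 1) / 2).toNat else 0)
        = (t.length + 1) / 2 := by split_ifs with h <;> omega
    rw [hc]
    have hf : (fun x : Nat => (a :: t)[((1 : Int) + 2 * (x : Int)).toNat]?) = (fun k => t[2 * k]?) := by
      funext k
      have h2 : ((1 : Int) + 2 * (k : Int)).toNat = 2 * k + 1 := by omega
      rw [h2]; simp
    rw [hf, (slice2_aux t).1]
    simp [pvOdds]

theorem seed_players_py_spec : Claim_equal_seed_players_py := by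
  intro pids ts _ hpre
  unfold Spec_seed_players_py seed_players_py
  simp only [seed_players_py_alt]
  rw [slice?_step2_zero, slice?_step2_one]
  simp only [Option.getD_some]
  rw [PySem.List.slice?_none_none_neg_one]
  simp only [Option.getD_some]
  rcases hpre with hnil | hle
  · subst hnil
    have := seedLoopA_char [] 0 [] [] ts.toNat (by simp)
    simp only [List.length_nil, Nat.cast_zero, List.nil_append, List.append_nil] at this
    have h1 : (0 : Int) + (ts.toNat : Int) - 1 = ts - 1 ∨ ts ≤ 0 := by omega
    by_cases hts : 0 ≤ ts
    · have e1 : ((ts.toNat : Int)) = ts := Int.toNat_of_nonneg hts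
      rw [e1] at this
      simp only [zero_add] at this
      rw [this]
      simp [pvEvens, pvOdds, PySem.List.slice_to _ hts, List.take_replicate]
    · have e0 : ts.toNat = 0 := by omega
      rw [e0]
      simp only [List.replicate, seedLoopA, Option.getD_some]
      simp [pvEvens, pvOdds, PySem.List.slice]
  · -- nonempty or not, length ≤ ts
    have hts : 0 ≤ ts := le_trans (by positivity) hle
    have hchar := seedLoopA_char pids 0 [] [] ts.toNat (by omega)
    simp only [List.length_nil, Nat.cast_zero, List.nil_append, List.append_nil, zero_add] at hchar
    rw [Int.toNat_of_nonneg hts] at hchar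
    rw [hchar]
    simp only [Option.getD_some]
    norm_num
    -- now compute B's side
    have hlen := pvEvens_odds_length pids
    set e := (pvEvens pids).length with he
    set o := (pvOdds pids).length with ho
    have hob : (0 : Int) ≤ ts - (o : Int) := by omega
    rw [PySem.List.slice_to _ hob]
    have htn : (ts - (o : Int)).toNat = ts.toNat - o := by omega
    rw [htn]
    have hsplit : ts.toNat - o = e + (ts.toNat - o - e) := by omega
    rw [hsplit]
    have hlm : (List.map (some : Int → Option Int) (pvEvens pids)).length = e := by
      simp [he]
    rw [List.take_append]
    have h1 : List.take (e + (ts.toNat - o - e)) (List.map some (pvEvens pids))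
        = List.map some (pvEvens pids) := List.take_of_length_le (by simp only [hlm]; omega)
    have h2 : e + (ts.toNat - o - e) - (List.map some (pvEvens pids)).length
        = ts.toNat - o - e := by simp only [hlm]; omega
    rw [h1, h2, List.take_replicate]
    have hmin : min (ts.toNat - o - e) (ts.toNat - e) = ts.toNat - pids.length := by omega
    rw [hmin]
    simp
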